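-- pv_equiv track=rewrite | github.com/zhoujy22/DeepSeq3 | src/utils/circuit_utils.py | get_ff_connection
-- ===== SOURCE A (Python) =====
-- def get_ff_connection(x_data, fanin_list, fanout_list, level_list):
--     fpi_list = []
--     ff_fanin_list = []
--     ff_fanout_list = []
--
--     for idx, x_data_info in enumerate(x_data):
--         fpi_list.append([])
--         ff_fanin_list.append([])
--         ff_fanout_list.append([])
--         if x_data_info[1] == 0 or x_data_info[1] == 3:
--             fpi_list[idx].append(idx)
--
--     for level in range(len(level_list)):
--         for idx in level_list[level]:
--             # Update fanout_idx
--             for fanin_idx in fanin_list[idx]: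
--                 fpi_list[idx] += fpi_list[fanin_idx]
--             fpi_list[idx] = list(set(fpi_list[idx]))
--
--     for idx, x_data_info in enumerate(x_data):
--         if x_data[idx][1] == 3:
--             comb_idx = fanin_list[idx][0]
--             for ff_idx in fpi_list[comb_idx]:
--                 ff_fanin_list[idx].append(ff_idx)
--                 ff_fanout_list[ff_idx].append(idx)
--
--     # Detect PO
--     po_ff_list = []
--     for idx, x_data_info in enumerate(x_data):
--         if len(fanin_list[idx]) > 0 and len(fanout_list[idx]) == 0:
--             po_ff_list += fpi_list[idx]
--     po_ff_list = list(set(po_ff_list))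
--
--     return ff_fanin_list, ff_fanout_list
-- ===== SOURCE B (Python) =====
-- def get_ff_connection(x_data, fanin_list, fanout_list, level_list):
--     n = len(x_data)
--     fpi = [[i] if x_data[i][1] in (0, 3) else [] for i in range(n)]
--     for idx in (i for level in level_list for i in level):
--         fpi[idx] = list(set(fpi[idx] + [s for f in fanin_list[idx] for s in fpi[f]]))
--     ff_fanin = [list(fpi[fanin_list[i][0]]) if x_data[i][1] == 3 else [] for i in range(n)]
--     memb = [set(s) for s in ff_fanin]
--     ff_fanout = [[j for j in range(n) if i in memb[j]] for i in range(n)]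
--     return ff_fanin, ff_fanout
-- ===== Notes on version B (the rewrite author's own statement) =====
-- stated objective: simpler
-- what changed: B replaces A's append-and-mutate bookkeeping by direct comprehensions: seeds and ff_fanin are built as per-index maps, the per-node merge gathers all fanin source lists in one flatMap before a single list(set(...)), ff_fanout is obtained by transposing ff_fanin with a membership filter instead of in-place appends, and the dead po_ff_list block is dropped.
import Mathlib
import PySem

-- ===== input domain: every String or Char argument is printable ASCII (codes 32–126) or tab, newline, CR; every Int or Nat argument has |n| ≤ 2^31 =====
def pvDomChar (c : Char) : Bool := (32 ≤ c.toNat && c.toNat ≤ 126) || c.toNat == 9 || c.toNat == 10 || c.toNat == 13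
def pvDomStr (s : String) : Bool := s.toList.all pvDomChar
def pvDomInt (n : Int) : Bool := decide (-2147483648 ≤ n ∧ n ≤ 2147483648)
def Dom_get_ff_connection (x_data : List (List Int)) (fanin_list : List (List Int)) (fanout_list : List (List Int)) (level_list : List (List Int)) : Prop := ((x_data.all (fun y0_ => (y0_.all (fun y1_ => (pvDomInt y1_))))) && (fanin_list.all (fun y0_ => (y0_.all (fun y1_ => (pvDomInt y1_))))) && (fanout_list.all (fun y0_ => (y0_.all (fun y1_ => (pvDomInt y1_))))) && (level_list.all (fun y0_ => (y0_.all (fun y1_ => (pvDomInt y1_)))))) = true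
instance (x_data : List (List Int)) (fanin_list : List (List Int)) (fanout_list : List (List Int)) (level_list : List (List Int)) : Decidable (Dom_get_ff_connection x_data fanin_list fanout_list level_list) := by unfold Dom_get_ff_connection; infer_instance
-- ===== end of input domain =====

-- B rebuilds the tables by direct comprehensions (one-shot merge per node, transposed membership
-- filter for ff_fanout, dead po_ff_list block dropped) instead of A's append-and-mutate passes.


-- ===== PORT A =====
-- Shared model of CPython's `list(set(l))` for int elements (both Pythons call it with the same
-- argument lists): hash(x) = x except hash(-1) = -2 (exact for |x| < 2^61 - 1, which covers the
-- domain), open addressing with 9 linear probes then perturb jumps, table growth at fill*5 >= mask*3,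
-- iteration in table order.  Duplicate inserts are CPython no-ops, so the simulation runs on the
-- first-occurrence dedup of the argument.
def pvHash (x : Int) : Int := if x = -1 then -2 else x

def pvU64 (h : Int) : Nat := (h % (18446744073709551616 : Int)).toNat

def pvLinear (t : List (Option Int)) (i mask : Nat) : Option Nat :=
  if i + 9 ≤ mask then ((List.range 9).map (fun k => i + 1 + k)).find? (fun j => t[j]? == some none)
  else none

def pvProbe (t : List (Option Int)) : Nat → Nat → Nat → Option Nat
  | _, _, 0 => none
  | i, perturb, fuel+1 =>
    if t[i]? == some none then some i
    else
      match pvLinear t i (t.length - 1) with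
      | some j => some j
      | none =>
        let p := perturb >>> 5
        pvProbe t ((i * 5 + 1 + p) &&& (t.length - 1)) p fuel

def pvInsert (t : List (Option Int)) (x : Int) : List (Option Int) :=
  let h := pvHash x
  match pvProbe t (pvU64 h &&& (t.length - 1)) (pvU64 h) (t.length * 2 + 70) with
  | some j => t.set j (some x)
  | none => t ++ [some x]  -- fuel fallback, never reached with the generous fuel above

def pvGrowAux (minused : Nat) : Nat → Nat → Nat
  | 0, ns => ns
  | fuel+1, ns => if ns ≤ minused then pvGrowAux minused fuel (ns * 2) else ns

def pvSomes (t : List (Option Int)) : List Int := t.filterMap id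

def pvAdd (st : List (Option Int) × Nat) (x : Int) : List (Option Int) × Nat :=
  let t := pvInsert st.1 x
  let fill := st.2 + 1
  if 3 * (t.length - 1) ≤ 5 * fill then
    let minused := if 50000 < fill then fill * 2 else fill * 4
    ((pvSomes t).foldl pvInsert (List.replicate (pvGrowAux minused (minused + 4) 8) none), fill)
  else (t, fill)

def pySetList (l : List Int) : List Int :=
  pvSomes ((PySem.List.dedup l).foldl pvAdd (List.replicate 8 none, 0)).1

def get_ff_connection (x_data : List (List Int)) (fanin_list : List (List Int)) (fanout_list : List (List Int)) (level_list : List (List Int)) : List (List Int) × List (List Int) :=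
  -- for idx, x_data_info in enumerate(x_data): append [] thrice; seed fpi_list[idx]
  let init := (PySem.List.enumerate x_data 0).foldl
    (fun (st : List (List Int) × List (List Int) × List (List Int)) p =>
      let fpi := st.1 ++ [[]]
      let ffi := st.2.1 ++ [[]]
      let ffo := st.2.2 ++ [[]]
      let fpi := if PySem.List.pyGetD p.2 1 0 = 0 ∨ PySem.List.pyGetD p.2 1 0 = 3 then
          PySem.List.pySetD fpi p.1 (PySem.List.pyGetD fpi p.1 [] ++ [p.1])
        else fpi
      (fpi, ffi, ffo)) ([], [], [])
  -- for level in range(len(level_list)): for idx in level_list[level]: merge fanin fpis, dedup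
  let fpi := (PySem.List.pyRange 0 (PySem.List.len level_list) 1).foldl
    (fun fpi lvlIdx =>
      (PySem.List.pyGetD level_list lvlIdx []).foldl
        (fun fpi idx =>
          let fpi := (PySem.List.pyGetD fanin_list idx []).foldl
            (fun fp f => PySem.List.pySetD fp idx (PySem.List.pyGetD fp idx [] ++ PySem.List.pyGetD fp f [])) fpi
          PySem.List.pySetD fpi idx (pySetList (PySem.List.pyGetD fpi idx []))) fpi) init.1
  -- for idx, x_data_info in enumerate(x_data): if x_data[idx][1] == 3: record connections
  let res := (PySem.List.enumerate x_data 0).foldl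
    (fun (st : List (List Int) × List (List Int)) p =>
      if PySem.List.pyGetD (PySem.List.pyGetD x_data p.1 []) 1 0 = 3 then
        let comb := PySem.List.pyGetD (PySem.List.pyGetD fanin_list p.1 []) 0 0
        (PySem.List.pyGetD fpi comb []).foldl
          (fun st ff =>
            (PySem.List.pySetD st.1 p.1 (PySem.List.pyGetD st.1 p.1 [] ++ [ff]),
             PySem.List.pySetD st.2 ff (PySem.List.pyGetD st.2 ff [] ++ [p.1]))) st
      else st) (init.2.1, init.2.2)
  -- the po_ff_list block of A computes a value that is never used; its only observable effect is
  -- the IndexError excluded by Pre_, so it contributes nothing to the returned value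
  res

-- ===== PORT B =====
def get_ff_connection_alt (x_data : List (List Int)) (fanin_list : List (List Int)) (fanout_list : List (List Int)) (level_list : List (List Int)) : List (List Int) × List (List Int) :=
  let n := PySem.List.len x_data
  let fpi0 := (PySem.List.pyRange 0 n 1).map (fun i =>
    if PySem.List.pyGetD (PySem.List.pyGetD x_data i []) 1 0 = 0 ∨
       PySem.List.pyGetD (PySem.List.pyGetD x_data i []) 1 0 = 3 then [i] else [])
  let fpi := (level_list.flatMap (fun level => level)).foldl
    (fun fpi idx =>
      PySem.List.pySetD fpi idx (pySetList
        (PySem.List.pyGetD fpi idx [] ++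
         (PySem.List.pyGetD fanin_list idx []).flatMap (fun f => PySem.List.pyGetD fpi f [])))) fpi0
  let ffi := (PySem.List.pyRange 0 n 1).map (fun i =>
    if PySem.List.pyGetD (PySem.List.pyGetD x_data i []) 1 0 = 3 then
      PySem.List.pyGetD fpi (PySem.List.pyGetD (PySem.List.pyGetD fanin_list i []) 0 0) []
    else [])
  let memb := ffi.map (fun s => PySem.Set.ofList s)
  let ffo := (PySem.List.pyRange 0 n 1).map (fun i =>
    (PySem.List.pyRange 0 n 1).filter (fun j => decide (i ∈ PySem.List.pyGetD memb j [])))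
  (ffi, ffo)

-- ===== PRECONDITION & SPEC =====
-- rows long enough for x_data_info[1]
def pvP0 (x_data : List (List Int)) : Prop := ∀ row ∈ x_data, 2 ≤ row.length
-- every index named by level_list is a valid (possibly negative) index into fpi_list and
-- fanin_list, and its fanins are valid indices into fpi_list
def pvP1 (x_data fanin_list level_list : List (List Int)) : Prop :=
  ∀ lvl ∈ level_list, ∀ idx ∈ lvl,
    (-(x_data.length : Int) ≤ idx ∧ idx < x_data.length) ∧
    (-(fanin_list.length : Int) ≤ idx ∧ idx < fanin_list.length) ∧
    (∀ f ∈ PySem.List.pyGetD fanin_list idx [], -(x_data.length : Int) ≤ f ∧ f < x_data.length)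
-- every type-3 node has a first fanin that is a valid index into fpi_list
def pvP2 (x_data fanin_list : List (List Int)) : Prop :=
  ∀ i : Nat, i < x_data.length →
    PySem.List.pyGetD (PySem.List.pyGetD x_data (i : Int) []) 1 0 = 3 →
    PySem.List.pyGetD fanin_list (i : Int) [] ≠ [] ∧
    -(x_data.length : Int) ≤ PySem.List.pyGetD (PySem.List.pyGetD fanin_list (i : Int) []) 0 0 ∧
    PySem.List.pyGetD (PySem.List.pyGetD fanin_list (i : Int) []) 0 0 < x_data.length
-- the dead po_ff_list scan of A stays within fanin_list/fanout_list
def pvP3 (x_data fanin_list fanout_list : List (List Int)) : Prop :=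
  ∀ i : Nat, i < x_data.length →
    i < fanin_list.length ∧
    (PySem.List.pyGetD fanin_list (i : Int) [] ≠ [] → i < fanout_list.length)

def Pre_get_ff_connection (x_data : List (List Int)) (fanin_list : List (List Int)) (fanout_list : List (List Int)) (level_list : List (List Int)) : Prop :=
  pvP0 x_data ∧ pvP1 x_data fanin_list level_list ∧ pvP2 x_data fanin_list ∧ pvP3 x_data fanin_list fanout_list
instance (x_data : List (List Int)) (fanin_list : List (List Int)) (fanout_list : List (List Int)) (level_list : List (List Int)) : Decidable (Pre_get_ff_connection x_data fanin_list fanout_list level_list) := by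
  unfold Pre_get_ff_connection pvP0 pvP1 pvP2 pvP3; infer_instance

def pvWitness_get_ff_connection : List (List Int) × List (List Int) × List (List Int) × List (List Int) :=
  ([[0, 0], [0, 1], [0, 3]], [[], [0], [1]], [[1], [2], []], [[0], [1], [2]])

def Spec_get_ff_connection (x_data : List (List Int)) (fanin_list : List (List Int)) (fanout_list : List (List Int)) (level_list : List (List Int)) (out : List (List Int) × List (List Int)) : Prop := out = get_ff_connection_alt x_data fanin_list fanout_list level_list
instance (x_data : List (List Int)) (fanin_list : List (List Int)) (fanout_list : List (List Int)) (level_list : List (List Int)) (out : List (List Int) × List (List Int)) : Decidable (Spec_get_ff_connection x_data fanin_list fanout_list level_list out) := by unfold Spec_get_ff_connection; infer_instance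

-- ===== CLAIM (what is proved, stated in full; the proofs are below) =====
def Claim_equal_get_ff_connection : Prop := ∀ (x_data : List (List Int)) (fanin_list : List (List Int)) (fanout_list : List (List Int)) (level_list : List (List Int)), Dom_get_ff_connection x_data fanin_list fanout_list level_list → Pre_get_ff_connection x_data fanin_list fanout_list level_list → Spec_get_ff_connection x_data fanin_list fanout_list level_list (get_ff_connection x_data fanin_list fanout_list level_list)


-- ===== LEMMAS AND PROOFS =====

-- ---- resolved (possibly negative) Python indices ----
def pvRidx (n : Nat) (i : Int) : Nat := if 0 ≤ i then i.toNat else n - (-i).toNat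

theorem pvIdx_eq {n : Nat} {i : Int} (h1 : -(n : Int) ≤ i) (h2 : i < n) :
    PySem.List.pyIdx? n i = some (pvRidx n i) := by
  simp only [PySem.List.pyIdx?, pvRidx]
  split_ifs <;> first | rfl | omega

theorem pvRidx_lt {n : Nat} {i : Int} (h1 : -(n : Int) ≤ i) (h2 : i < n) : pvRidx n i < n := by
  simp only [pvRidx]; split_ifs <;> omega

theorem pvGetD_eq {α : Type} (xs : List α) {i : Int} (d : α)
    (h1 : -(xs.length : Int) ≤ i) (h2 : i < xs.length) :
    PySem.List.pyGetD xs i d = xs.getD (pvRidx xs.length i) d := by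
  simp [PySem.List.pyGetD, PySem.List.pyGet?, pvIdx_eq h1 h2, List.getD_eq_getElem?_getD]

theorem pvSetD_eq {α : Type} (xs : List α) {i : Int} (v : α)
    (h1 : -(xs.length : Int) ≤ i) (h2 : i < xs.length) :
    PySem.List.pySetD xs i v = xs.set (pvRidx xs.length i) v := by
  simp [PySem.List.pySetD, PySem.List.pySet?, pvIdx_eq h1 h2]

theorem pvMem_pyGetD_nil {x : Int} {xs : List (List Int)} {i : Int}
    (h : x ∈ PySem.List.pyGetD xs i []) : ∃ s ∈ xs, x ∈ s := by
  unfold PySem.List.pyGetD at h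
  cases hg : PySem.List.pyGet? xs i with
  | none => rw [hg] at h; simp at h
  | some s =>
      rw [hg] at h
      refine ⟨s, ?_, by simpa using h⟩
      unfold PySem.List.pyGet? at hg
      cases hk : PySem.List.pyIdx? xs.length i with
      | none => rw [hk] at hg; simp at hg
      | some k =>
          rw [hk] at hg; simp at hg
          exact List.mem_of_getElem? hg

theorem pvGetD_set {α : Type} (l : List α) (r q : Nat) (v d : α) (hr : r < l.length) :
    (l.set r v).getD q d = if q = r then v else l.getD q d := by
  by_cases hq : q = r
  · subst hq; simp [List.getD_eq_getElem?_getD, List.getElem?_set, hr]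
  · rw [List.getD_eq_getElem?_getD, List.getD_eq_getElem?_getD, List.getElem?_set,
      if_neg (fun h => hq h.symm), if_neg hq]

theorem pvSet_getD_self {α : Type} (l : List α) (r : Nat) (d : α) (hr : r < l.length) :
    l.set r (l.getD r d) = l := by
  rw [List.getD_eq_getElem l d hr]; exact List.set_getElem_self hr

-- ---- dedup (= PySem.Set.ofList, first occurrences) facts ----
theorem pvDedup_append (u c : List Int) :
    PySem.List.dedup (u ++ c) = List.foldl PySem.Set.add (PySem.List.dedup u) c := by
  simp [PySem.List.dedup, PySem.Set.ofList, List.foldl_append]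

theorem pvAdd_mem_eq (s : PySem.Set Int) (x : Int) (h : x ∈ s) : PySem.Set.add s x = s := by
  simp [PySem.Set.add, PySem.Set.contains, List.contains_iff_mem, h]

theorem pvFoldl_add_subset (c : List Int) : ∀ (s : PySem.Set Int),
    (∀ x ∈ c, x ∈ s) → List.foldl PySem.Set.add s c = s := by
  induction c with
  | nil => intro s _; rfl
  | cons x c ih =>
      intro s h
      have hx : x ∈ s := h x (by simp)
      simp only [List.foldl_cons, pvAdd_mem_eq s x hx]
      exact ih s (fun y hy => h y (by simp [hy]))

theorem pvDedup_append_congr {u v : List Int} (h : PySem.List.dedup u = PySem.List.dedup v)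
    (c : List Int) : PySem.List.dedup (u ++ c) = PySem.List.dedup (v ++ c) := by
  rw [pvDedup_append, pvDedup_append, h]

theorem pvDedup_append_sub {u c : List Int} (h : ∀ x ∈ c, x ∈ u) :
    PySem.List.dedup (u ++ c) = PySem.List.dedup u := by
  rw [pvDedup_append]
  exact pvFoldl_add_subset c _ (fun x hx => by
    have := h x hx
    simpa [PySem.List.dedup] using (PySem.Set.mem_ofList u x).mpr this)

-- A's threaded merge and B's one-shot merge agree up to dedup
theorem pvMerge_dedup (old : Int → List Int) (sel : Int → Prop) [DecidablePred sel] :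
    ∀ (fs : List Int) (m bm : List Int), PySem.List.dedup m = PySem.List.dedup bm →
    (∀ f ∈ fs, sel f → ∀ x ∈ old f, x ∈ bm) →
    PySem.List.dedup (fs.foldl (fun acc f => acc ++ (if sel f then acc else old f)) m)
      = PySem.List.dedup (bm ++ fs.flatMap old) := by
  intro fs
  induction fs with
  | nil => intro m bm hd _; simpa using hd
  | cons f fs ih =>
      intro m bm hd hsub
      have hmem : ∀ x, x ∈ m ↔ x ∈ bm := by
        intro x
        have := congrArg (fun l => x ∈ l) hd
        simpa [PySem.List.dedup, PySem.Set.mem_ofList] using this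
      simp only [List.foldl_cons, List.flatMap_cons]
      by_cases hsel : sel f
      · rw [if_pos hsel]
        have hsb : ∀ x ∈ old f, x ∈ bm := hsub f (by simp) hsel
        have h1 : PySem.List.dedup (m ++ m) = PySem.List.dedup (bm ++ old f) := by
          rw [pvDedup_append_sub (fun x hx => hx), pvDedup_append_sub hsb]; exact hd
        have h2 := ih (m ++ m) (bm ++ old f) h1
          (fun g hg hs x hx => List.mem_append_left _ (hsub g (by simp [hg]) hs x hx))
        rw [h2, List.append_assoc]
      · rw [if_neg hsel]
        have h1 : PySem.List.dedup (m ++ old f) = PySem.List.dedup (bm ++ old f) :=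
          pvDedup_append_congr hd _
        have h2 := ih (m ++ old f) (bm ++ old f) h1
          (fun g hg hs x hx => List.mem_append_left _ (hsub g (by simp [hg]) hs x hx))
        rw [h2, List.append_assoc]

-- ---- pySetList facts ----
theorem pySetList_congr {l l' : List Int} (h : PySem.List.dedup l = PySem.List.dedup l') :
    pySetList l = pySetList l' := by
  unfold pySetList; rw [h]

theorem pvProbe_none {t : List (Option Int)} : ∀ {fuel i p j : Nat},
    pvProbe t i p fuel = some j → t[j]? = some none := by
  intro fuel
  induction fuel with
  | zero => intro i p j h; simp [pvProbe] at h
  | succ fuel ih =>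
      intro i p j h
      rw [pvProbe] at h
      by_cases hi : t[i]? = some none
      · simp [hi] at h; subst h; exact hi
      · have hbe : (t[i]? == some none) = false := by simpa using hi
        rw [hbe] at h; simp at h
        cases hl : pvLinear t i (t.length - 1) with
        | some j' =>
            rw [hl] at h; simp at h; subst h
            unfold pvLinear at hl
            by_cases hc : i + 9 ≤ t.length - 1
            · rw [if_pos hc] at hl
              have := List.find?_some hl
              simpa using this
            · rw [if_neg hc] at hl; simp at hl
        | none => rw [hl] at h; exact ih h

theorem pvSomes_set {t : List (Option Int)} : ∀ {j : Nat} {x : Int}, t[j]? = some none →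
    (pvSomes (t.set j (some x))).Perm (x :: pvSomes t) := by
  induction t with
  | nil => intro j x h; simp at h
  | cons a t ih =>
      intro j x h
      cases j with
      | zero =>
          simp at h; subst h
          simp [pvSomes]
      | succ j =>
          simp at h
          have hperm := ih (x := x) h
          cases a with
          | none => simpa [pvSomes] using hperm
          | some y =>
              simp only [pvSomes, List.set_cons_succ, List.filterMap_cons] at *
              simp only [id] at *
              exact (hperm.cons y).trans (List.Perm.swap x y _)

theorem pvInsert_perm (t : List (Option Int)) (x : Int) :
    (pvSomes (pvInsert t x)).Perm (x :: pvSomes t) := by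
  unfold pvInsert
  cases hp : pvProbe t (pvU64 (pvHash x) &&& (t.length - 1)) (pvU64 (pvHash x)) (t.length * 2 + 70) with
  | some j =>
      simp only [hp]
      exact pvSomes_set (pvProbe_none hp)
  | none =>
      simp only [hp, pvSomes, List.filterMap_append, List.filterMap_cons, List.filterMap_nil, id]
      exact List.perm_append_singleton _ _

theorem pvFoldl_insert_perm (xs : List Int) : ∀ (t : List (Option Int)),
    (pvSomes (xs.foldl pvInsert t)).Perm (pvSomes t ++ xs) := by
  induction xs with
  | nil => intro t; simp
  | cons x xs ih =>
      intro t
      simp only [List.foldl_cons]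
      refine ((ih (pvInsert t x)).trans ?_)
      refine (((pvInsert_perm t x).append_right xs).trans ?_)
      exact (List.perm_middle (l₁ := pvSomes t) (a := x) (l₂ := xs)).symm

theorem pvAdd_perm (st : List (Option Int) × Nat) (x : Int) :
    (pvSomes (pvAdd st x).1).Perm (x :: pvSomes st.1) := by
  unfold pvAdd
  by_cases hc : 3 * ((pvInsert st.1 x).length - 1) ≤ 5 * (st.2 + 1)
  · simp only [hc, if_true]
    refine ((pvFoldl_insert_perm (pvSomes (pvInsert st.1 x)) _).trans ?_)
    have : pvSomes (List.replicate (pvGrowAux (if 50000 < st.2 + 1 then (st.2 + 1) * 2 else (st.2 + 1) * 4) ((if 50000 < st.2 + 1 then (st.2 + 1) * 2 else (st.2 + 1) * 4) + 4) 8) (none : Option Int)) = [] := by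
      simp [pvSomes, List.filterMap_replicate]
    rw [this]
    simpa using pvInsert_perm st.1 x
  · simp only [hc, if_false]
    exact pvInsert_perm st.1 x

theorem pvFoldl_pvAdd_perm (xs : List Int) : ∀ (st : List (Option Int) × Nat),
    (pvSomes (xs.foldl pvAdd st).1).Perm (pvSomes st.1 ++ xs) := by
  induction xs with
  | nil => intro st; simp
  | cons x xs ih =>
      intro st
      simp only [List.foldl_cons]
      refine ((ih (pvAdd st x)).trans ?_)
      refine (((pvAdd_perm st x).append_right xs).trans ?_)
      exact (List.perm_middle (l₁ := pvSomes st.1) (a := x) (l₂ := xs)).symm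

theorem pySetList_perm (l : List Int) : (pySetList l).Perm (PySem.List.dedup l) := by
  unfold pySetList
  have h := pvFoldl_pvAdd_perm (PySem.List.dedup l) (List.replicate 8 none, 0)
  have h0 : pvSomes (List.replicate 8 (none : Option Int)) = [] := by
    simp [pvSomes, List.filterMap_replicate]
  rw [h0] at h
  simpa using h

theorem pySetList_nodup (l : List Int) : (pySetList l).Nodup := by
  exact ((pySetList_perm l).nodup_iff).mpr (PySem.List.nodup_dedup l)

theorem mem_pySetList {x : Int} {l : List Int} : x ∈ pySetList l ↔ x ∈ l := by
  rw [(pySetList_perm l).mem_iff]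
  exact PySem.List.mem_dedup l x

-- ---- small list helpers ----
theorem pvSet_append_singleton {α : Type} (a : List α) (y v : α) :
    (a ++ [y]).set a.length v = a ++ [v] := by
  induction a with
  | nil => rfl
  | cons h t ih => simpa [List.set] using ih

theorem pvMap_range_set {α : Type} (n k : Nat) (f : Nat → α) (v : α) (hk : k < n) :
    ((List.range n).map f).set k v = (List.range n).map (fun i => if i = k then v else f i) := by
  apply List.ext_getElem
  · simp
  · intro i h1 h2
    simp only [List.getElem_set, List.getElem_map, List.getElem_range]
    by_cases hik : i = k
    · subst hik; simp
    · rw [if_neg (fun h => hik h.symm), if_neg hik]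

theorem pvGetD_map_range {α : Type} (n k : Nat) (f : Nat → α) (d : α) (hk : k < n) :
    ((List.range n).map f).getD k d = f k := by
  have hlen : k < ((List.range n).map f).length := by simpa using hk
  rw [List.getD_eq_getElem _ _ hlen]
  simp

theorem pvMap_filter_eq_filterMap {α β : Type} (f : α → β) (q : α → Bool) (l : List α) :
    (l.filter q).map f = l.filterMap (fun x => if q x then some (f x) else none) := by
  induction l with
  | nil => rfl
  | cons a l ih =>
      by_cases hq : q a
      · simp [List.filter_cons, List.filterMap_cons, hq, ih]
      · simp [List.filter_cons, List.filterMap_cons, hq, ih]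

-- ---- membership through pyGet? ----
theorem pvPyGet?_mem {α : Type} {xs : List α} {i : Int} {s : α}
    (h : PySem.List.pyGet? xs i = some s) : s ∈ xs := by
  unfold PySem.List.pyGet? at h
  cases hk : PySem.List.pyIdx? xs.length i with
  | none => rw [hk] at h; simp at h
  | some k => rw [hk] at h; simp at h; exact List.mem_of_getElem? h

theorem pvFilterMap_congr {α β : Type} {f g : α → Option β} :
    ∀ {l : List α}, (∀ a ∈ l, f a = g a) → l.filterMap f = l.filterMap g := by
  intro l
  induction l with
  | nil => intro _; rfl
  | cons a l ih =>
      intro h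
      rw [List.filterMap_cons, List.filterMap_cons, h a (by simp), ih (fun b hb => h b (by simp [hb]))]

theorem pvGetD_eq' {α : Type} (xs : List α) {n : Nat} {i : Int} (d : α) (hn : xs.length = n)
    (h1 : -(n : Int) ≤ i) (h2 : i < n) :
    PySem.List.pyGetD xs i d = xs.getD (pvRidx n i) d := by
  subst hn; exact pvGetD_eq xs d h1 h2

theorem pvSetD_eq' {α : Type} (xs : List α) {n : Nat} {i : Int} (v : α) (hn : xs.length = n)
    (h1 : -(n : Int) ≤ i) (h2 : i < n) :
    PySem.List.pySetD xs i v = xs.set (pvRidx n i) v := by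
  subst hn; exact pvSetD_eq xs v h1 h2

theorem pvRidx_ofNat (n : Nat) {i : Int} (h : 0 ≤ i) : pvRidx n i = i.toNat := if_pos h

-- ---- the three phases ----
-- zeta-expanded forms of A's loop bodies (definitionally equal to the port's lambdas)
def pvStep1 (st : List (List Int) × List (List Int) × List (List Int)) (p : Int × List Int) :
    List (List Int) × List (List Int) × List (List Int) :=
  (if PySem.List.pyGetD p.2 1 0 = 0 ∨ PySem.List.pyGetD p.2 1 0 = 3 then
      PySem.List.pySetD (st.1 ++ [[]]) p.1 (PySem.List.pyGetD (st.1 ++ [[]]) p.1 [] ++ [p.1])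
    else st.1 ++ [[]], st.2.1 ++ [[]], st.2.2 ++ [[]])

def pvStepA (fanin_list : List (List Int)) (fpi : List (List Int)) (idx : Int) : List (List Int) :=
  PySem.List.pySetD
    ((PySem.List.pyGetD fanin_list idx []).foldl
      (fun fp f => PySem.List.pySetD fp idx (PySem.List.pyGetD fp idx [] ++ PySem.List.pyGetD fp f [])) fpi)
    idx
    (pySetList (PySem.List.pyGetD
      ((PySem.List.pyGetD fanin_list idx []).foldl
        (fun fp f => PySem.List.pySetD fp idx (PySem.List.pyGetD fp idx [] ++ PySem.List.pyGetD fp f [])) fpi)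
      idx []))

def pvStepB (fanin_list : List (List Int)) (fpi : List (List Int)) (idx : Int) : List (List Int) :=
  PySem.List.pySetD fpi idx (pySetList
    (PySem.List.pyGetD fpi idx [] ++
     (PySem.List.pyGetD fanin_list idx []).flatMap (fun f => PySem.List.pyGetD fpi f [])))

def pvStep3 (x_data fanin_list fpi : List (List Int)) (st : List (List Int) × List (List Int))
    (p : Int × List Int) : List (List Int) × List (List Int) :=
  if PySem.List.pyGetD (PySem.List.pyGetD x_data p.1 []) 1 0 = 3 then
    (PySem.List.pyGetD fpi (PySem.List.pyGetD (PySem.List.pyGetD fanin_list p.1 []) 0 0) []).foldl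
      (fun st ff =>
        (PySem.List.pySetD st.1 p.1 (PySem.List.pyGetD st.1 p.1 [] ++ [ff]),
         PySem.List.pySetD st.2 ff (PySem.List.pyGetD st.2 ff [] ++ [p.1]))) st
  else st

def pvInv (n : Nat) (fpi : List (List Int)) : Prop :=
  fpi.length = n ∧ ∀ s ∈ fpi, s.Nodup ∧ ∀ x ∈ s, 0 ≤ x ∧ x < n

def pvCond (n L : Nat) (fanin_list : List (List Int)) (idx : Int) : Prop :=
  (-(n : Int) ≤ idx ∧ idx < n) ∧ (-(L : Int) ≤ idx ∧ idx < L) ∧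
  ∀ f ∈ PySem.List.pyGetD fanin_list idx [], -(n : Int) ≤ f ∧ f < n

theorem pvSlot_nodup {n : Nat} {fpi : List (List Int)} (hinv : pvInv n fpi) (i : Int) :
    (PySem.List.pyGetD fpi i []).Nodup := by
  unfold PySem.List.pyGetD
  cases hg : PySem.List.pyGet? fpi i with
  | none => simp
  | some s => simpa using (hinv.2 s (pvPyGet?_mem hg)).1

theorem pvSlot_bounds {n : Nat} {fpi : List (List Int)} (hinv : pvInv n fpi) (i : Int) :
    ∀ x ∈ PySem.List.pyGetD fpi i [], 0 ≤ x ∧ x < n := by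
  intro x hx
  obtain ⟨s, hs, hxs⟩ := pvMem_pyGetD_nil hx
  exact (hinv.2 s hs).2 x hxs

-- phase 1
theorem pvGetD_append_len {α : Type} (a : List α) (y d : α) : (a ++ [y]).getD a.length d = y := by
  induction a with
  | nil => rfl
  | cons h t ih => simpa using ih

theorem pvPhase1_aux (xs : List (List Int)) : ∀ (k : Nat) (a b c : List (List Int)), a.length = k →
    (PySem.List.enumerate xs (k : Int)).foldl pvStep1 (a, b, c)
    = (a ++ (PySem.List.enumerate xs (k : Int)).map
          (fun p => if PySem.List.pyGetD p.2 1 0 = 0 ∨ PySem.List.pyGetD p.2 1 0 = 3 then [p.1] else []),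
       b ++ List.replicate xs.length [], c ++ List.replicate xs.length []) := by
  induction xs with
  | nil => intro k a b c _; simp [PySem.List.enumerate_nil]
  | cons x xs ih =>
      intro k a b c ha
      rw [PySem.List.enumerate_cons, List.foldl_cons, List.map_cons]
      have hcast : (k : Int) + 1 = ((k + 1 : Nat) : Int) := by push_cast; ring
      have hget : PySem.List.pyGetD (a ++ [[]]) (k : Int) ([] : List Int) = [] := by
        rw [PySem.List.pyGetD_natCast, ← ha, pvGetD_append_len]
      have hset : ∀ v : List Int, PySem.List.pySetD (a ++ [[]]) (k : Int) v = a ++ [v] := by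
        intro v
        rw [PySem.List.pySetD_natCast, ← ha, pvSet_append_singleton]
      have hstep : pvStep1 (a, b, c) ((k : Int), x)
          = (a ++ [if PySem.List.pyGetD x 1 0 = 0 ∨ PySem.List.pyGetD x 1 0 = 3 then [(k : Int)] else []],
             b ++ [[]], c ++ [[]]) := by
        unfold pvStep1
        by_cases hc : PySem.List.pyGetD x 1 0 = 0 ∨ PySem.List.pyGetD x 1 0 = 3
        · simp only [hc, if_true, if_pos]
          rw [hget, hset]
          simp
        · simp [hc]
      rw [hstep, hcast, ih (k + 1) _ _ _ (by simp [ha])]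
      simp [List.append_assoc, List.replicate_succ]

theorem pvPhase1 (x_data : List (List Int)) :
    (PySem.List.enumerate x_data 0).foldl pvStep1 ([], [], [])
    = ((PySem.List.enumerate x_data 0).map
          (fun p => if PySem.List.pyGetD p.2 1 0 = 0 ∨ PySem.List.pyGetD p.2 1 0 = 3 then [p.1] else []),
       List.replicate x_data.length [], List.replicate x_data.length []) := by
  have h := pvPhase1_aux x_data 0 [] [] [] rfl
  simpa using h

-- phase 2
theorem pvInnerA_shape (n : Nat) (fpi : List (List Int)) (idx : Int)
    (hlen : fpi.length = n) (hi1 : -(n : Int) ≤ idx) (hi2 : idx < n) :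
    ∀ (fs : List Int) (m : List Int), (∀ f ∈ fs, -(n : Int) ≤ f ∧ f < n) →
    fs.foldl (fun fp f => PySem.List.pySetD fp idx (PySem.List.pyGetD fp idx [] ++ PySem.List.pyGetD fp f []))
      (fpi.set (pvRidx n idx) m)
    = fpi.set (pvRidx n idx) (fs.foldl (fun acc f =>
        acc ++ (if pvRidx n f = pvRidx n idx then acc else PySem.List.pyGetD fpi f [])) m) := by
  have hrlt : pvRidx n idx < n := pvRidx_lt hi1 hi2
  intro fs
  induction fs with
  | nil => intro m _; rfl
  | cons f fs ih =>
      intro m hf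
      obtain ⟨hf1, hf2⟩ := hf f (by simp)
      rw [List.foldl_cons, List.foldl_cons]
      have hlen2 : (fpi.set (pvRidx n idx) m).length = n := by simp [hlen]
      have hg1 : PySem.List.pyGetD (fpi.set (pvRidx n idx) m) idx [] = m := by
        rw [pvGetD_eq' _ _ hlen2 hi1 hi2, pvGetD_set _ _ _ _ _ (hlen ▸ hrlt), if_pos rfl]
      have hg2 : PySem.List.pyGetD (fpi.set (pvRidx n idx) m) f []
          = if pvRidx n f = pvRidx n idx then m else PySem.List.pyGetD fpi f [] := by
        rw [pvGetD_eq' _ _ hlen2 hf1 hf2, pvGetD_set _ _ _ _ _ (hlen ▸ hrlt)]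
        by_cases hq : pvRidx n f = pvRidx n idx
        · rw [if_pos hq, if_pos hq]
        · rw [if_neg hq, if_neg hq, pvGetD_eq' fpi _ hlen hf1 hf2]
      have hs : PySem.List.pySetD (fpi.set (pvRidx n idx) m) idx
            (m ++ if pvRidx n f = pvRidx n idx then m else PySem.List.pyGetD fpi f [])
          = fpi.set (pvRidx n idx)
            (m ++ if pvRidx n f = pvRidx n idx then m else PySem.List.pyGetD fpi f []) := by
        rw [pvSetD_eq' _ _ hlen2 hi1 hi2, List.set_set]
      rw [hg1, hg2, hs, ih _ (fun g hg => hf g (by simp [hg]))]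

theorem pvStep_eq {n L : Nat} {fanin_list fpi : List (List Int)} {idx : Int}
    (hlen : fpi.length = n) (hc : pvCond n L fanin_list idx) :
    pvStepA fanin_list fpi idx = pvStepB fanin_list fpi idx := by
  obtain ⟨⟨hi1, hi2⟩, _, hfs⟩ := hc
  have hrlt : pvRidx n idx < n := pvRidx_lt hi1 hi2
  have hrl : pvRidx n idx < fpi.length := by omega
  have hself : fpi.set (pvRidx n idx) (fpi.getD (pvRidx n idx) []) = fpi :=
    pvSet_getD_self fpi _ [] hrl
  unfold pvStepA pvStepB
  conv_lhs => rw [← hself]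
  rw [pvInnerA_shape n fpi idx hlen hi1 hi2 _ _ hfs]
  have hlen2 : (fpi.set (pvRidx n idx)
      ((PySem.List.pyGetD fanin_list idx []).foldl (fun acc f =>
        acc ++ (if pvRidx n f = pvRidx n idx then acc else PySem.List.pyGetD fpi f []))
        (fpi.getD (pvRidx n idx) []))).length = n := by simp [hlen]
  rw [pvGetD_eq' _ _ hlen2 hi1 hi2, pvGetD_set _ _ _ _ _ (hlen ▸ hrlt), if_pos rfl]
  rw [pvSetD_eq' _ _ hlen2 hi1 hi2, List.set_set, pvSetD_eq' _ _ hlen hi1 hi2]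
  have hB : PySem.List.pyGetD fpi idx [] = fpi.getD (pvRidx n idx) [] :=
    pvGetD_eq' fpi _ hlen hi1 hi2
  rw [hB]
  refine congrArg _ (pySetList_congr ?_)
  have hsub : ∀ f ∈ PySem.List.pyGetD fanin_list idx [], pvRidx n f = pvRidx n idx →
      ∀ x ∈ PySem.List.pyGetD fpi f [], x ∈ fpi.getD (pvRidx n idx) [] := by
    intro f hf hsel x hx
    rw [pvGetD_eq' fpi _ hlen (hfs f hf).1 (hfs f hf).2, hsel] at hx
    exact hx
  exact pvMerge_dedup (fun f => PySem.List.pyGetD fpi f [])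
    (fun f => pvRidx n f = pvRidx n idx) _ _ _ rfl hsub

theorem pvStepB_inv {n L : Nat} {fanin_list fpi : List (List Int)} {idx : Int}
    (hinv : pvInv n fpi) (hc : pvCond n L fanin_list idx) :
    pvInv n (pvStepB fanin_list fpi idx) := by
  obtain ⟨hl, hmem⟩ := hinv
  obtain ⟨⟨hi1, hi2⟩, _, _⟩ := hc
  unfold pvStepB
  rw [pvSetD_eq' _ _ hl hi1 hi2]
  refine ⟨by simp [hl], ?_⟩
  intro s hs
  rcases List.mem_or_eq_of_mem_set hs with h | h
  · exact hmem s h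
  · subst h
    refine ⟨pySetList_nodup _, ?_⟩
    intro x hx
    rw [mem_pySetList] at hx
    rcases List.mem_append.mp hx with h | h
    · obtain ⟨s', hs', hx'⟩ := pvMem_pyGetD_nil h
      exact (hmem s' hs').2 x hx'
    · obtain ⟨f, _, hx'⟩ := List.mem_flatMap.mp h
      obtain ⟨s', hs', hx''⟩ := pvMem_pyGetD_nil hx'
      exact (hmem s' hs').2 x hx''

theorem pvPhase2 (n L : Nat) (fanin_list : List (List Int)) :
    ∀ (flat : List Int) (fpi : List (List Int)), (∀ idx ∈ flat, pvCond n L fanin_list idx) →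
    pvInv n fpi →
    flat.foldl (pvStepA fanin_list) fpi = flat.foldl (pvStepB fanin_list) fpi ∧
    pvInv n (flat.foldl (pvStepB fanin_list) fpi) := by
  intro flat
  induction flat with
  | nil => intro fpi _ hinv; exact ⟨rfl, hinv⟩
  | cons idx flat ih =>
      intro fpi hc hinv
      have hc0 := hc idx (by simp)
      have hstep := pvStep_eq (L := L) hinv.1 hc0
      have hinv' := pvStepB_inv hinv hc0
      rw [List.foldl_cons, List.foldl_cons, hstep]
      exact ih _ (fun j hj => hc j (by simp [hj])) hinv'

-- phase 3
def pvSrcs (fanin_list fpi : List (List Int)) (j : Int) : List Int :=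
  PySem.List.pyGetD fpi (PySem.List.pyGetD (PySem.List.pyGetD fanin_list j []) 0 0) []

def pvF (x_data fanin_list fpi : List (List Int)) (n k : Nat) : List (List Int) :=
  (List.range n).map (fun (i : Nat) =>
    if i < k ∧ PySem.List.pyGetD (PySem.List.pyGetD x_data (i : Int) []) 1 0 = 3
    then pvSrcs fanin_list fpi (i : Int) else [])

def pvG (x_data fanin_list fpi : List (List Int)) (n k : Nat) : List (List Int) :=
  (List.range n).map (fun (s : Nat) =>
    (List.range k).filterMap (fun (j : Nat) =>
      if PySem.List.pyGetD (PySem.List.pyGetD x_data (j : Int) []) 1 0 = 3 ∧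
         (s : Int) ∈ pvSrcs fanin_list fpi (j : Int)
      then some (j : Int) else none))

theorem pvF_zero (x_data fanin_list fpi : List (List Int)) (n : Nat) :
    pvF x_data fanin_list fpi n 0 = List.replicate n [] := by
  unfold pvF
  apply List.ext_getElem
  · simp
  · intro i h1 h2; simp

theorem pvG_zero (x_data fanin_list fpi : List (List Int)) (n : Nat) :
    pvG x_data fanin_list fpi n 0 = List.replicate n [] := by
  unfold pvG
  apply List.ext_getElem
  · simp
  · intro i h1 h2; simp

theorem pvInner3 (n : Nat) (k : Nat) (hk : k < n) :
    ∀ (srcsl : List Int) (ffi ffo : List (List Int)),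
    srcsl.Nodup → (∀ x ∈ srcsl, 0 ≤ x ∧ x < n) → ffi.length = n → ffo.length = n →
    srcsl.foldl (fun (st : List (List Int) × List (List Int)) ff =>
        (PySem.List.pySetD st.1 (k : Int) (PySem.List.pyGetD st.1 (k : Int) [] ++ [ff]),
         PySem.List.pySetD st.2 ff (PySem.List.pyGetD st.2 ff [] ++ [(k : Int)]))) (ffi, ffo)
    = (ffi.set k (ffi.getD k [] ++ srcsl),
       (List.range n).map (fun s => ffo.getD s [] ++ if ((s : Int) ∈ srcsl) then [(k : Int)] else [])) := by
  intro srcsl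
  induction srcsl with
  | nil =>
      intro ffi ffo _ _ hfl hol
      rw [List.foldl_nil]
      refine Prod.ext ?_ ?_
      · rw [List.append_nil, pvSet_getD_self ffi k [] (by omega)]
      · apply List.ext_getElem
        · simp [hol]
        · intro i h1 h2
          simp only [List.getElem_map, List.getElem_range]
          rw [if_neg (by simp), List.append_nil, List.getD_eq_getElem ffo [] (by omega)]
  | cons ff rest ih =>
      intro ffi ffo hnd hb hfl hol
      obtain ⟨hff0, hffn⟩ := hb ff (by simp)
      have hnotmem : ff ∉ rest := (List.nodup_cons.mp hnd).1
      rw [List.foldl_cons]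
      have e1 : PySem.List.pySetD ffi (k : Int) (PySem.List.pyGetD ffi (k : Int) [] ++ [ff])
          = ffi.set k (ffi.getD k [] ++ [ff]) := by
        rw [PySem.List.pyGetD_natCast, PySem.List.pySetD_natCast]
      have e2 : PySem.List.pySetD ffo ff (PySem.List.pyGetD ffo ff [] ++ [(k : Int)])
          = ffo.set ff.toNat (ffo.getD ff.toNat [] ++ [(k : Int)]) := by
        rw [pvGetD_eq' ffo _ hol (by omega) (by omega),
            pvSetD_eq' ffo _ hol (by omega) (by omega), pvRidx_ofNat n hff0]
      have hft : ff.toNat < n := by omega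
      rw [e1, e2, ih _ _ (List.nodup_cons.mp hnd).2 (fun y hy => hb y (by simp [hy]))
          (by simp [hfl]) (by simp [hol])]
      refine Prod.ext ?_ ?_
      · rw [pvGetD_set ffi k k _ [] (by omega), if_pos rfl, List.set_set]
        simp [List.append_assoc]
      · apply List.map_congr_left
        intro s hs
        have hsn : s < n := List.mem_range.mp hs
        rw [pvGetD_set ffo ff.toNat s _ [] (by omega)]
        by_cases hsf : s = ff.toNat
        · have hcast : ((s : Nat) : Int) = ff := by omega
          rw [if_pos hsf, hcast, if_neg hnotmem, List.append_nil,
              if_pos (show ff ∈ ff :: rest by simp), hsf]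
        · have hne : ((s : Nat) : Int) ≠ ff := by omega
          rw [if_neg hsf]
          simp [List.mem_cons, hne]

theorem pvPhase3_aux (x_data fanin_list fpi : List (List Int))
    (hinv : pvInv x_data.length fpi) :
    ∀ (xs : List (List Int)) (k : Nat), k + xs.length = x_data.length →
    (PySem.List.enumerate xs (k : Int)).foldl (pvStep3 x_data fanin_list fpi)
      (pvF x_data fanin_list fpi x_data.length k, pvG x_data fanin_list fpi x_data.length k)
    = (pvF x_data fanin_list fpi x_data.length x_data.length,
       pvG x_data fanin_list fpi x_data.length x_data.length) := by
  intro xs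
  induction xs with
  | nil =>
      intro k hk
      have : k = x_data.length := by simpa using hk
      subst this
      rw [PySem.List.enumerate_nil, List.foldl_nil]
  | cons x xs ih =>
      intro k hk
      have hkn : k < x_data.length := by simp at hk; omega
      rw [PySem.List.enumerate_cons, List.foldl_cons]
      have hstep : pvStep3 x_data fanin_list fpi
            (pvF x_data fanin_list fpi x_data.length k, pvG x_data fanin_list fpi x_data.length k)
            ((k : Int), x)
          = (pvF x_data fanin_list fpi x_data.length (k + 1),
             pvG x_data fanin_list fpi x_data.length (k + 1)) := by
        unfold pvStep3
        by_cases h3 : PySem.List.pyGetD (PySem.List.pyGetD x_data (k : Int) []) 1 0 = 3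
        · rw [if_pos h3]
          rw [pvInner3 x_data.length k hkn _ _ _ (pvSlot_nodup hinv _) (pvSlot_bounds hinv _)
              (by simp [pvF]) (by simp [pvG])]
          refine Prod.ext ?_ ?_
          · show (pvF x_data fanin_list fpi x_data.length k).set k
                ((pvF x_data fanin_list fpi x_data.length k).getD k [] ++
                  PySem.List.pyGetD fpi (PySem.List.pyGetD (PySem.List.pyGetD fanin_list (k : Int) []) 0 0) [])
              = pvF x_data fanin_list fpi x_data.length (k + 1)
            unfold pvF
            rw [pvGetD_map_range _ _ _ _ hkn, if_neg (by simp), List.nil_append,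
                pvMap_range_set _ _ _ _ hkn]
            apply List.map_congr_left
            intro i hi
            by_cases hik : i = k
            · subst hik
              rw [if_pos rfl, if_pos ⟨by omega, h3⟩]
              rfl
            · rw [if_neg hik]
              have : (i < k ∧ PySem.List.pyGetD (PySem.List.pyGetD x_data (i : Int) []) 1 0 = 3)
                  ↔ (i < k + 1 ∧ PySem.List.pyGetD (PySem.List.pyGetD x_data (i : Int) []) 1 0 = 3) := by
                constructor
                · rintro ⟨h1, h2⟩; exact ⟨by omega, h2⟩
                · rintro ⟨h1, h2⟩; exact ⟨by omega, h2⟩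
              simp only [this]
          · show (List.range x_data.length).map (fun s =>
                  (pvG x_data fanin_list fpi x_data.length k).getD s [] ++
                  if ((s : Int) ∈ PySem.List.pyGetD fpi
                      (PySem.List.pyGetD (PySem.List.pyGetD fanin_list (k : Int) []) 0 0) [])
                  then [(k : Int)] else [])
              = pvG x_data fanin_list fpi x_data.length (k + 1)
            unfold pvG
            apply List.map_congr_left
            intro s hs
            have hsn : s < x_data.length := List.mem_range.mp hs
            rw [pvGetD_map_range _ _ _ _ hsn, List.range_succ, List.filterMap_append]
            congr 1
            show (if ((s : Int) ∈ pvSrcs fanin_list fpi (k : Int)) then [(k : Int)] else [])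
              = List.filterMap _ [k]
            rw [List.filterMap_cons, List.filterMap_nil]
            by_cases hm : (s : Int) ∈ pvSrcs fanin_list fpi (k : Int)
            · rw [if_pos hm, if_pos ⟨h3, hm⟩]
            · rw [if_neg hm, if_neg (by rintro ⟨_, h⟩; exact hm h)]
        · rw [if_neg h3]
          have eF : pvF x_data fanin_list fpi x_data.length k
              = pvF x_data fanin_list fpi x_data.length (k + 1) := by
            unfold pvF
            apply List.map_congr_left
            intro i _
            by_cases hik : i = k
            · subst hik
              rw [if_neg (by rintro ⟨_, h⟩; exact h3 h), if_neg (by rintro ⟨_, h⟩; exact h3 h)]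
            · have : (i < k) ↔ (i < k + 1) := by omega
              simp only [this]
          have eG : pvG x_data fanin_list fpi x_data.length k
              = pvG x_data fanin_list fpi x_data.length (k + 1) := by
            unfold pvG
            apply List.map_congr_left
            intro s _
            rw [List.range_succ, List.filterMap_append, List.filterMap_cons, List.filterMap_nil,
                if_neg (by rintro ⟨h, _⟩; exact h3 h), List.append_nil]
          rw [eF, eG]
      rw [hstep]
      have hcast : (k : Int) + 1 = ((k + 1 : Nat) : Int) := by push_cast; ring
      rw [hcast, ih (k + 1) (by simp at hk ⊢; omega)]

theorem pvPhase3 (x_data fanin_list fpi : List (List Int)) (hinv : pvInv x_data.length fpi) :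
    (PySem.List.enumerate x_data 0).foldl (pvStep3 x_data fanin_list fpi)
      (List.replicate x_data.length [], List.replicate x_data.length [])
    = (pvF x_data fanin_list fpi x_data.length x_data.length,
       pvG x_data fanin_list fpi x_data.length x_data.length) := by
  have h := pvPhase3_aux x_data fanin_list fpi hinv x_data 0 (by simp)
  rw [pvF_zero, pvG_zero, Nat.cast_zero] at h
  exact h


-- final shapes of the two output components (for any propagated fpi table)
theorem pvFinal_ffi (x_data fanin_list fpi : List (List Int)) :
    pvF x_data fanin_list fpi x_data.length x_data.length
    = (PySem.List.pyRange 0 (PySem.List.len x_data) 1).map (fun i =>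
        if PySem.List.pyGetD (PySem.List.pyGetD x_data i []) 1 0 = 3 then
          PySem.List.pyGetD fpi (PySem.List.pyGetD (PySem.List.pyGetD fanin_list i []) 0 0) []
        else []) := by
  unfold pvF
  simp only [PySem.List.len_eq, PySem.List.pyRange_zero_nat, List.map_map]
  apply List.map_congr_left
  intro i hi
  have hin : i < x_data.length := List.mem_range.mp hi
  simp only [Function.comp_apply]
  by_cases h3 : PySem.List.pyGetD (PySem.List.pyGetD x_data (i : Int) []) 1 0 = 3
  · rw [if_pos ⟨hin, h3⟩, if_pos h3]; rfl
  · rw [if_neg (by rintro ⟨_, h⟩; exact h3 h), if_neg h3]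

theorem pvFinal_ffo (x_data fanin_list fpi : List (List Int)) :
    pvG x_data fanin_list fpi x_data.length x_data.length
    = (PySem.List.pyRange 0 (PySem.List.len x_data) 1).map (fun i =>
        (PySem.List.pyRange 0 (PySem.List.len x_data) 1).filter (fun j =>
          decide (i ∈ PySem.List.pyGetD
            (((PySem.List.pyRange 0 (PySem.List.len x_data) 1).map (fun i =>
              if PySem.List.pyGetD (PySem.List.pyGetD x_data i []) 1 0 = 3 then
                PySem.List.pyGetD fpi (PySem.List.pyGetD (PySem.List.pyGetD fanin_list i []) 0 0) []
              else [])).map (fun s => PySem.Set.ofList s)) j []))) := by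
  unfold pvG
  simp only [PySem.List.len_eq, PySem.List.pyRange_zero_nat, List.map_map]
  apply List.map_congr_left
  intro s hs
  simp only [Function.comp_apply]
  rw [List.filter_map, pvMap_filter_eq_filterMap]
  apply pvFilterMap_congr
  intro j hj
  have hjn : j < x_data.length := List.mem_range.mp hj
  simp only [Function.comp_apply, PySem.List.pyGetD_natCast, decide_eq_true_eq]
  rw [pvGetD_map_range _ _ _ _ hjn]
  by_cases h3 : PySem.List.pyGetD (x_data.getD j []) 1 0 = 3
  · simp only [h3, if_true, true_and]
    have hsrc : pvSrcs fanin_list fpi ((j : Nat) : Int)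
        = PySem.List.pyGetD fpi (PySem.List.pyGetD (fanin_list.getD j []) 0 0) [] := by
      simp [pvSrcs, PySem.List.pyGetD_natCast]
    rw [hsrc]
    simp only [List.getD_eq_getElem?_getD] at h3
    simp [PySem.Set.mem_ofList, h3]
  · simp only [List.getD_eq_getElem?_getD] at h3
    simp [PySem.Set.mem_ofList, h3]

theorem get_ff_connection_spec : Claim_equal_get_ff_connection := by
  intro x_data fanin_list fanout_list level_list _dom pre
  obtain ⟨p0, p1, p2, p3⟩ := pre
  unfold Spec_get_ff_connection
  have h1 : get_ff_connection x_data fanin_list fanout_list level_list =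
      (PySem.List.enumerate x_data 0).foldl
        (pvStep3 x_data fanin_list
          ((PySem.List.pyRange 0 (PySem.List.len level_list) 1).foldl
            (fun fpi lvlIdx =>
              (PySem.List.pyGetD level_list lvlIdx []).foldl (pvStepA fanin_list) fpi)
            (((PySem.List.enumerate x_data 0).foldl pvStep1 ([], [], [])).1)))
        (((PySem.List.enumerate x_data 0).foldl pvStep1 ([], [], [])).2.1,
         ((PySem.List.enumerate x_data 0).foldl pvStep1 ([], [], [])).2.2) := rfl
  have h2 : get_ff_connection_alt x_data fanin_list fanout_list level_list =
      ((PySem.List.pyRange 0 (PySem.List.len x_data) 1).map (fun i =>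
        if PySem.List.pyGetD (PySem.List.pyGetD x_data i []) 1 0 = 3 then
          PySem.List.pyGetD ((level_list.flatMap (fun level => level)).foldl (pvStepB fanin_list)
      ((PySem.List.pyRange 0 (PySem.List.len x_data) 1).map (fun i =>
        if PySem.List.pyGetD (PySem.List.pyGetD x_data i []) 1 0 = 0 ∨
           PySem.List.pyGetD (PySem.List.pyGetD x_data i []) 1 0 = 3 then [i] else [])))
            (PySem.List.pyGetD (PySem.List.pyGetD fanin_list i []) 0 0) []
        else []),
       (PySem.List.pyRange 0 (PySem.List.len x_data) 1).map (fun i =>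
        (PySem.List.pyRange 0 (PySem.List.len x_data) 1).filter (fun j =>
          decide (i ∈ PySem.List.pyGetD (((PySem.List.pyRange 0 (PySem.List.len x_data) 1).map (fun i =>
        if PySem.List.pyGetD (PySem.List.pyGetD x_data i []) 1 0 = 3 then
          PySem.List.pyGetD ((level_list.flatMap (fun level => level)).foldl (pvStepB fanin_list)
      ((PySem.List.pyRange 0 (PySem.List.len x_data) 1).map (fun i =>
        if PySem.List.pyGetD (PySem.List.pyGetD x_data i []) 1 0 = 0 ∨
           PySem.List.pyGetD (PySem.List.pyGetD x_data i []) 1 0 = 3 then [i] else [])))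
            (PySem.List.pyGetD (PySem.List.pyGetD fanin_list i []) 0 0) []
        else [])).map (fun s => PySem.Set.ofList s)) j [])))) := rfl
  rw [h1, h2, pvPhase1 x_data]
  dsimp only
  have hseed : (PySem.List.enumerate x_data 0).map
      (fun p => if PySem.List.pyGetD p.2 1 0 = 0 ∨ PySem.List.pyGetD p.2 1 0 = 3 then [p.1] else [])
      = (PySem.List.pyRange 0 (PySem.List.len x_data) 1).map (fun i =>
        if PySem.List.pyGetD (PySem.List.pyGetD x_data i []) 1 0 = 0 ∨
           PySem.List.pyGetD (PySem.List.pyGetD x_data i []) 1 0 = 3 then [i] else []) := by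
    rw [PySem.List.enumerate_eq_map_pyRange x_data ([] : List Int), List.map_map]
    rfl
  rw [hseed, PySem.List.len_eq level_list]
  have hA2 : (PySem.List.pyRange 0 ((level_list.length : Int)) 1).foldl
      (fun fpi lvlIdx => (PySem.List.pyGetD level_list lvlIdx []).foldl (pvStepA fanin_list) fpi)
      ((PySem.List.pyRange 0 (PySem.List.len x_data) 1).map (fun i =>
        if PySem.List.pyGetD (PySem.List.pyGetD x_data i []) 1 0 = 0 ∨
           PySem.List.pyGetD (PySem.List.pyGetD x_data i []) 1 0 = 3 then [i] else []))
      = level_list.foldl (fun acc lvl => lvl.foldl (pvStepA fanin_list) acc)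
        ((PySem.List.pyRange 0 (PySem.List.len x_data) 1).map (fun i =>
        if PySem.List.pyGetD (PySem.List.pyGetD x_data i []) 1 0 = 0 ∨
           PySem.List.pyGetD (PySem.List.pyGetD x_data i []) 1 0 = 3 then [i] else [])) :=
    PySem.List.foldl_pyRange_zero_pyGetD' level_list ([] : List Int)
      (fun acc lvl => lvl.foldl (pvStepA fanin_list) acc) _
  rw [hA2]
  have hA3 : level_list.foldl (fun acc lvl => lvl.foldl (pvStepA fanin_list) acc)
      ((PySem.List.pyRange 0 (PySem.List.len x_data) 1).map (fun i =>
        if PySem.List.pyGetD (PySem.List.pyGetD x_data i []) 1 0 = 0 ∨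
           PySem.List.pyGetD (PySem.List.pyGetD x_data i []) 1 0 = 3 then [i] else []))
      = (level_list.flatMap (fun level => level)).foldl (pvStepA fanin_list)
        ((PySem.List.pyRange 0 (PySem.List.len x_data) 1).map (fun i =>
        if PySem.List.pyGetD (PySem.List.pyGetD x_data i []) 1 0 = 0 ∨
           PySem.List.pyGetD (PySem.List.pyGetD x_data i []) 1 0 = 3 then [i] else [])) :=
    (List.foldl_flatMap).symm
  rw [hA3]
  have hflat : ∀ idx ∈ level_list.flatMap (fun level => level),
      pvCond x_data.length fanin_list.length fanin_list idx := by
    intro idx hidx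
    obtain ⟨lvl, hlvl, hmem⟩ := List.mem_flatMap.mp hidx
    exact p1 lvl hlvl idx hmem
  have hinv0 : pvInv x_data.length
      ((PySem.List.pyRange 0 (PySem.List.len x_data) 1).map (fun i =>
        if PySem.List.pyGetD (PySem.List.pyGetD x_data i []) 1 0 = 0 ∨
           PySem.List.pyGetD (PySem.List.pyGetD x_data i []) 1 0 = 3 then [i] else [])) := by
    constructor
    · simp [PySem.List.length_pyRange_one]
    · intro s hs
      simp only [List.mem_map] at hs
      obtain ⟨i, hi, rfl⟩ := hs
      have hib := PySem.List.mem_pyRange_one.mp hi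
      by_cases hc : PySem.List.pyGetD (PySem.List.pyGetD x_data i []) 1 0 = 0 ∨
          PySem.List.pyGetD (PySem.List.pyGetD x_data i []) 1 0 = 3
      · rw [if_pos hc]
        refine ⟨by simp, ?_⟩
        intro x hx
        simp only [List.mem_singleton] at hx
        subst hx
        exact ⟨hib.1, by simpa using hib.2⟩
      · rw [if_neg hc]
        simp
  obtain ⟨heq2, hinv⟩ := pvPhase2 x_data.length fanin_list.length fanin_list
    (level_list.flatMap (fun level => level)) _ hflat hinv0
  rw [heq2]
  rw [pvPhase3 x_data fanin_list _ hinv]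
  rw [Prod.mk.injEq]
  exact ⟨pvFinal_ffi x_data fanin_list _, pvFinal_ffo x_data fanin_list _⟩
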